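-- pv_equiv track=rewrite | github.com/Satendra8/Strivers-A2Z-DSA | 9. Stack and Queues/9.3 Monotonic Stack Queue Problems/9.3.7 Sum of subarray ranges.py | prevLargerElement
-- ===== SOURCE A (Python) =====
-- def prevLargerElement(nums, n):
--     stack = []
--     ans = [-1]*n
--
--     for i in range(n):
--         while stack and nums[stack[-1]] < nums[i]:
--             stack.pop()
--         if stack:
--             ans[i] = stack[-1]
--         stack.append(i)
--     return ans
-- ===== SOURCE B (Python) =====
-- def prevLargerElement(nums, n):
--     ans = [-1] * n
--     for i in range(n):
--         j = i - 1
--         while j != -1 and nums[j] < nums[i]: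
--             j = ans[j]
--         ans[i] = j
--     return ans
-- ===== Notes on version B (the rewrite author's own statement) =====
-- stated objective: alternative
-- what changed: Replaces the explicit monotonic stack (push/pop of indices) by a jump-pointer walk that follows the already-computed ans[] entries backwards, so no auxiliary stack is kept.
import Mathlib
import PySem

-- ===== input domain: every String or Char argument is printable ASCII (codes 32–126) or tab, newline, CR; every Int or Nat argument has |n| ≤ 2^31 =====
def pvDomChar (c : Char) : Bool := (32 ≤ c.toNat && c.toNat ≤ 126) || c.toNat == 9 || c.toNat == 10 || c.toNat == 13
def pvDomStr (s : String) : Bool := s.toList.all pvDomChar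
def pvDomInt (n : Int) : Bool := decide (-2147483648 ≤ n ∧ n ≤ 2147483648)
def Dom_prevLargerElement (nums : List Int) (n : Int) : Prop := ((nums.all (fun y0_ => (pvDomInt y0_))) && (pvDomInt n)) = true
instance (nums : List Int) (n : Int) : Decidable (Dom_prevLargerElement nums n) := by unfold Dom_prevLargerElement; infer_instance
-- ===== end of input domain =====

-- B replaces A's explicit monotonic stack by a jump-pointer walk over the ans array itself
-- (same return value; neither version mutates its arguments).

-- ===== PORT A =====
-- Python's `while stack and nums[stack[-1]] < nums[i]: stack.pop()`; the Lean stack keeps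
-- its top at the HEAD of the list (Python appends/pops at the tail end).
def pvPop (nums : List Int) (x : Int) : List Int → List Int
  | [] => []
  | t :: rest => if PySem.List.pyGetD nums t 0 < x then pvPop nums x rest else t :: rest

def prevLargerElement (nums : List Int) (n : Int) : List Int :=
  ((PySem.List.pyRange 0 n 1).foldl
    (fun st i =>
      let s' := pvPop nums (PySem.List.pyGetD nums i 0) st.1
      let ans' := match s' with
        | [] => st.2
        | t :: _ => PySem.List.pySetD st.2 i t
      (i :: s', ans'))
    ([], List.replicate n.toNat (-1))).2

-- ===== PORT B =====
-- Python's `while j != -1 and nums[j] < nums[i]: j = ans[j]`; the fuel i.toNat + 1 bounds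
-- the number of jumps (each jump strictly decreases j, which starts at i - 1).
def pvJump (nums ans : List Int) (x : Int) : Nat → Int → Int
  | 0, j => j
  | f + 1, j =>
      if j ≠ -1 ∧ PySem.List.pyGetD nums j 0 < x then
        pvJump nums ans x f (PySem.List.pyGetD ans j 0)
      else j

def prevLargerElement_alt (nums : List Int) (n : Int) : List Int :=
  (PySem.List.pyRange 0 n 1).foldl
    (fun ans i =>
      PySem.List.pySetD ans i (pvJump nums ans (PySem.List.pyGetD nums i 0) (i.toNat + 1) (i - 1)))
    (List.replicate n.toNat (-1))

-- ===== PRECONDITION & SPEC =====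
-- Pre_ excludes n > len(nums), on which the Python A raises IndexError (nums[i] for i ≥ len).
def Pre_prevLargerElement (nums : List Int) (n : Int) : Prop := n ≤ (nums.length : Int)
instance (nums : List Int) (n : Int) : Decidable (Pre_prevLargerElement nums n) := by
  unfold Pre_prevLargerElement; infer_instance

def pvWitness_prevLargerElement : List Int × Int := ([3, 1, 2], 3)

def Spec_prevLargerElement (nums : List Int) (n : Int) (out : List Int) : Prop := out = prevLargerElement_alt nums n
instance (nums : List Int) (n : Int) (out : List Int) : Decidable (Spec_prevLargerElement nums n out) := by unfold Spec_prevLargerElement; infer_instance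

-- ===== CLAIM (what is proved, stated in full; the proofs are below) =====
def Claim_equal_prevLargerElement : Prop := ∀ (nums : List Int) (n : Int), Dom_prevLargerElement nums n → Pre_prevLargerElement nums n → Spec_prevLargerElement nums n (prevLargerElement nums n)

-- ===== LEMMAS AND PROOFS =====

-- The two step functions of the folds, named for the proofs.
def stepA (nums : List Int) (st : List Int × List Int) (i : Int) : List Int × List Int :=
  let s' := pvPop nums (PySem.List.pyGetD nums i 0) st.1
  let ans' := match s' with
    | [] => st.2
    | t :: _ => PySem.List.pySetD st.2 i t
  (i :: s', ans')

def stepB (nums : List Int) (ans : List Int) (i : Int) : List Int :=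
  PySem.List.pySetD ans i (pvJump nums ans (PySem.List.pyGetD nums i 0) (i.toNat + 1) (i - 1))

lemma prevLargerElement_eq (nums : List Int) (n : Int) :
    prevLargerElement nums n =
      ((PySem.List.pyRange 0 n 1).foldl (stepA nums) ([], List.replicate n.toNat (-1))).2 := rfl

lemma prevLargerElement_alt_eq (nums : List Int) (n : Int) :
    prevLargerElement_alt nums n =
      (PySem.List.pyRange 0 n 1).foldl (stepB nums) (List.replicate n.toNat (-1)) := rfl

-- `Linked ans j stack`: stack (top first) is exactly the chain j, ans[j], ans[ans[j]], … down to -1.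
def Linked (ans : List Int) : Int → List Int → Prop
  | j, [] => j = -1
  | j, t :: rest => j = t ∧ Linked ans (PySem.List.pyGetD ans t 0) rest

lemma mem_pvPop (nums : List Int) (x t : Int) (s : List Int) (h : t ∈ pvPop nums x s) : t ∈ s := by
  induction s with
  | nil => simpa [pvPop] using h
  | cons a rest ih =>
      by_cases hc : PySem.List.pyGetD nums a 0 < x
      · simp only [pvPop, if_pos hc] at h
        exact List.mem_cons_of_mem _ (ih h)
      · simp only [pvPop, if_neg hc] at h
        exact h

lemma length_pvPop (nums : List Int) (x : Int) (s : List Int) :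
    (pvPop nums x s).length ≤ s.length := by
  induction s with
  | nil => simp [pvPop]
  | cons a rest ih =>
      by_cases hc : PySem.List.pyGetD nums a 0 < x
      · simp only [pvPop, if_pos hc]
        exact le_trans ih (by simp)
      · simp [pvPop, if_neg hc]

lemma linked_congr (ans ans' : List Int) (j : Int) (stack : List Int)
    (h : ∀ t ∈ stack, PySem.List.pyGetD ans' t 0 = PySem.List.pyGetD ans t 0)
    (hL : Linked ans j stack) : Linked ans' j stack := by
  induction stack generalizing j with
  | nil => exact hL
  | cons t rest ih =>
      obtain ⟨rfl, hrest⟩ := hL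
      refine ⟨rfl, ?_⟩
      rw [h j (by simp)]
      exact ih _ (fun u hu => h u (List.mem_cons_of_mem _ hu)) hrest

lemma pop_jump (nums ans : List Int) (x : Int) :
    ∀ (stack : List Int) (j : Int) (f : Nat),
      Linked ans j stack → (∀ t ∈ stack, 0 ≤ t) → stack.length ≤ f →
      (pvJump nums ans x f j = (match pvPop nums x stack with | [] => -1 | t :: _ => t)
        ∧ Linked ans (pvJump nums ans x f j) (pvPop nums x stack)) := by
  intro stack
  induction stack with
  | nil =>
      intro j f hL _ _
      subst hL
      have hj : ∀ g : Nat, pvJump nums ans x g (-1) = -1 := by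
        intro g; cases g <;> simp [pvJump]
      exact ⟨by simp [pvPop, hj], by simpa [pvPop, Linked] using hj f⟩
  | cons u rest ih =>
      intro j f hL hpos hf
      obtain ⟨rfl, hrest⟩ := hL
      have hu : 0 ≤ j := hpos j (by simp)
      obtain ⟨f', rfl⟩ : ∃ f', f = f' + 1 := by
        cases f with
        | zero => simp at hf
        | succ f' => exact ⟨f', rfl⟩
      by_cases hc : PySem.List.pyGetD nums j 0 < x
      · have hstep : pvJump nums ans x (f' + 1) j
            = pvJump nums ans x f' (PySem.List.pyGetD ans j 0) := by
          have hcond : j ≠ -1 ∧ PySem.List.pyGetD nums j 0 < x := ⟨by omega, hc⟩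
          simp [pvJump, hcond]
        have := ih (PySem.List.pyGetD ans j 0) f' hrest
          (fun v hv => hpos v (List.mem_cons_of_mem _ hv)) (by simp at hf; omega)
        rw [hstep]
        simpa [pvPop, hc] using this
      · have hstep : pvJump nums ans x (f' + 1) j = j := by
          simp only [pvJump]
          rw [if_neg]
          rintro ⟨-, h2⟩; exact hc h2
        refine ⟨by simp [pvPop, hc, hstep], ?_⟩
        rw [hstep]
        simp only [pvPop, if_neg hc]
        exact ⟨rfl, hrest⟩

lemma pyGetD_int (xs : List Int) (t : Int) (ht : 0 ≤ t) :
    PySem.List.pyGetD xs t 0 = xs.getD t.toNat 0 := by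
  obtain ⟨m, rfl⟩ : ∃ m : Nat, t = (m : Int) := ⟨t.toNat, by omega⟩
  simp [PySem.List.pyGetD_natCast]

lemma getD_set_ne (l : List Int) (k p : Nat) (v : Int) (h : p ≠ k) :
    (l.set k v).getD p 0 = l.getD p 0 := by
  simp [List.getD_eq_getElem?_getD, List.getElem?_set_ne (by omega : k ≠ p)]

lemma set_getD_self (l : List Int) (k : Nat) (hk : k < l.length) (h : l.getD k 0 = -1) :
    l.set k (-1) = l := by
  apply List.ext_getElem (by simp)
  intro p hp1 hp2
  by_cases hpk : p = k
  · subst hpk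
    rw [List.getElem_set_self (by omega)]
    rw [List.getD_eq_getElem l 0 hk] at h
    exact h.symm
  · rw [List.getElem_set_ne (by omega)]

lemma pyGetD_set_ne (ans : List Int) (k : Nat) (v t : Int) (ht : 0 ≤ t) (hne : t ≠ (k : Int)) :
    PySem.List.pyGetD (ans.set k v) t 0 = PySem.List.pyGetD ans t 0 := by
  rw [pyGetD_int _ t ht, pyGetD_int _ t ht, getD_set_ne _ _ _ _ (by omega)]

lemma invariant (nums : List Int) (N : Nat) :
    ∀ (m : Nat), m ≤ N →
    ∃ stack ans,
      (PySem.List.pyRange 0 (m : Int) 1).foldl (stepA nums) ([], List.replicate N (-1)) = (stack, ans) ∧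
      (PySem.List.pyRange 0 (m : Int) 1).foldl (stepB nums) (List.replicate N (-1)) = ans ∧
      Linked ans ((m : Int) - 1) stack ∧
      (∀ t ∈ stack, 0 ≤ t ∧ t < (m : Int)) ∧
      stack.length ≤ m ∧
      ans.length = N ∧
      (∀ p : Nat, m ≤ p → p < N → ans.getD p 0 = -1) := by
  intro m
  induction m with
  | zero =>
      intro _
      refine ⟨[], List.replicate N (-1), ?_, ?_, ?_, ?_, ?_, ?_, ?_⟩
      · simp
      · simp
      · simp [Linked]
      · simp
      · simp
      · simp
      · intro p _ hp
        simp [List.getD_eq_getElem?_getD, hp]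
  | succ m ih =>
      intro hmN
      obtain ⟨stack, ans, hA, hB, hL, hmem, hlen, halen, hdef⟩ := ih (by omega)
      have hmN' : m < N := by omega
      have hmlen : m < ans.length := by omega
      have hm0 : (0 : Int) ≤ (m : Int) := by positivity
      have hsplit : PySem.List.pyRange 0 ((m + 1 : Nat) : Int) 1
          = PySem.List.pyRange 0 (m : Int) 1 ++ [(m : Int)] := by
        have := PySem.List.pyRange_one_succ_right (a := 0) (b := (m : Int)) hm0
        rw [← this]; norm_num
      obtain ⟨hjt, hLj⟩ := pop_jump nums ans (PySem.List.pyGetD nums (m : Int) 0) stack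
        ((m : Int) - 1) (m + 1) hL (fun t ht => (hmem t ht).1) (by omega)
      have hansm : ans.getD m 0 = -1 := hdef m (le_refl m) hmN'
      cases hcs : pvPop nums (PySem.List.pyGetD nums (m : Int) 0) stack with
      | nil =>
          rw [hcs] at hjt hLj
          have hjt2 : pvJump nums ans (PySem.List.pyGetD nums (m : Int) 0) (m + 1) ((m : Int) - 1) = -1 := hjt
          refine ⟨[(m : Int)], ans, ?_, ?_, ?_, ?_, ?_, halen, ?_⟩
          · rw [hsplit, List.foldl_append, hA, List.foldl_cons, List.foldl_nil]
            simp only [stepA]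
            rw [hcs]
          · rw [hsplit, List.foldl_append, hB, List.foldl_cons, List.foldl_nil]
            simp only [stepB, Int.toNat_natCast, hjt2, PySem.List.pySetD_natCast]
            exact set_getD_self ans m hmlen hansm
          · refine ⟨by push_cast; ring, ?_⟩
            show PySem.List.pyGetD ans (m : Int) 0 = -1
            rw [pyGetD_int _ _ hm0, Int.toNat_natCast]
            exact hansm
          · intro t ht
            simp only [List.mem_singleton] at ht
            subst ht
            exact ⟨hm0, by push_cast; omega⟩
          · simp
          · intro p hp1 hp2
            exact hdef p (by omega) hp2
      | cons t rest =>
          rw [hcs] at hjt hLj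
          have hjt2 : pvJump nums ans (PySem.List.pyGetD nums (m : Int) 0) (m + 1) ((m : Int) - 1) = t := hjt
          rw [hjt2] at hLj
          have htmem : ∀ v ∈ t :: rest, v ∈ stack := by
            intro v hv
            exact mem_pvPop nums _ v stack (hcs ▸ hv)
          have ht0 : 0 ≤ t := (hmem t (htmem t (by simp))).1
          refine ⟨(m : Int) :: t :: rest, ans.set m t, ?_, ?_, ?_, ?_, ?_, ?_, ?_⟩
          · rw [hsplit, List.foldl_append, hA, List.foldl_cons, List.foldl_nil]
            simp only [stepA]
            rw [hcs]
            simp [PySem.List.pySetD_natCast]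
          · rw [hsplit, List.foldl_append, hB, List.foldl_cons, List.foldl_nil]
            simp only [stepB, Int.toNat_natCast, hjt2, PySem.List.pySetD_natCast]
          · refine ⟨by push_cast; ring, ?_⟩
            have hhead : PySem.List.pyGetD (ans.set m t) (m : Int) 0 = t := by
              rw [pyGetD_int _ _ hm0, Int.toNat_natCast,
                List.getD_eq_getElem _ 0 (by simpa using hmlen),
                List.getElem_set_self (by simpa using hmlen)]
            rw [hhead]
            apply linked_congr ans _ t _ _ hLj
            intro v hv
            have hvb := hmem v (htmem v hv)
            exact pyGetD_set_ne ans m t v hvb.1 (by omega)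
          · intro v hv
            rcases List.mem_cons.mp hv with rfl | hv'
            · exact ⟨hm0, by push_cast; omega⟩
            · have := hmem v (htmem v hv')
              refine ⟨this.1, by push_cast; omega⟩
          · have h1 : (t :: rest).length ≤ stack.length := by
              rw [← hcs]; exact length_pvPop nums _ stack
            simp only [List.length_cons] at h1 ⊢
            omega
          · simpa using halen
          · intro p hp1 hp2
            rw [getD_set_ne _ _ _ _ (by omega)]
            exact hdef p (by omega) hp2

-- ===== VERDICT (by name: the statement is the Claim_ definition above) =====
theorem prevLargerElement_spec : Claim_equal_prevLargerElement := by
  intro nums n _ _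
  unfold Spec_prevLargerElement
  rw [prevLargerElement_eq, prevLargerElement_alt_eq]
  by_cases hn : n ≤ 0
  · rw [PySem.List.pyRange_one_eq_nil hn]
    rfl
  · obtain ⟨N, rfl⟩ : ∃ N : Nat, n = (N : Int) := ⟨n.toNat, by omega⟩
    obtain ⟨stack, ans, hA, hB, -⟩ := invariant nums N N (le_refl N)
    rw [Int.toNat_natCast, hA, hB]
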